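-- pv_equiv track=rewrite | github.com/ariuk44/retake_exam_prep | day_3.py | isRailroadTie3
-- ===== SOURCE A (Python) =====
-- def isRailroadTie3(arr):
--     n = len(arr)
--     if n == 0:
--         return 0
--     if all(x == 0 for x in arr):
--         return 0
--     for i in range(n):
--         if arr[i] == 0:
--             if i == 0 or i == n - 1:
--                 return 0
--             if arr[i - 1] == 0 or arr[i + 1] == 0:
--                 return 0
--         else:
--             neighbors = 0
--             if i > 0 and arr[i - 1] != 0:
--                 neighbors += 1
--             if i < n - 1 and arr[i + 1] != 0:
--                 neighbors += 1
--             if neighbors != 1: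
--                 return 0
--     return 1
-- ===== SOURCE B (Python) =====
-- def isRailroadTie3(arr):
--     # Consume the pattern (nonzero nonzero) separated by single zeros, left to right.
--     i, n = 0, len(arr)
--     while True:
--         if n - i < 2 or arr[i] == 0 or arr[i + 1] == 0:
--             return 0
--         i += 2
--         if i == n:
--             return 1
--         if arr[i] != 0:
--             return 0
--         i += 1
-- ===== Notes on version B (the rewrite author's own statement) =====
-- stated objective: alternative
-- what changed: Replaces A's per-index neighbor inspection (with a separate all-zero prescan) by a single left-to-right grammar consumer that eats 'nonzero nonzero' pairs separated by single zeros and never looks backwards.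
import Mathlib
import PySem

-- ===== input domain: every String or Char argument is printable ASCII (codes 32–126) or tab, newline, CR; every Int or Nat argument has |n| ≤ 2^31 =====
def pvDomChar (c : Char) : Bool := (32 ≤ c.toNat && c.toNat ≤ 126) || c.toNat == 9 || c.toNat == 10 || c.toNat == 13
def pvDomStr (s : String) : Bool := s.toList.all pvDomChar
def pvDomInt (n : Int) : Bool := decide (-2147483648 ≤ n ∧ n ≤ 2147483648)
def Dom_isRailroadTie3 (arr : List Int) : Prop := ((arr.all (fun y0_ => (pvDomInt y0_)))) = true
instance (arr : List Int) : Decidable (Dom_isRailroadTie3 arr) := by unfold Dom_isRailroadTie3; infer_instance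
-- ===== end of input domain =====

-- B replaces A's per-index neighbor inspection (plus all-zero prescan) by a forward grammar
-- consumer of 'nonzero nonzero' pairs separated by single zeros; same O(n), no speed claim.

-- ===== PORT A =====
-- the 'for i in range(n)' loop with early returns; every pyGetD access is guarded in range
-- by the surrounding tests, so the default 0 is never read.
def aLoop (arr : List Int) (n : Int) : List Int → Int
  | [] => 1
  | i :: is =>
    if PySem.List.pyGetD arr i 0 = 0 then
      if i = 0 ∨ i = n - 1 then 0
      else if PySem.List.pyGetD arr (i - 1) 0 = 0 ∨ PySem.List.pyGetD arr (i + 1) 0 = 0 then 0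
      else aLoop arr n is
    else
      let neighbors : Int :=
        (if 0 < i ∧ PySem.List.pyGetD arr (i - 1) 0 ≠ 0 then 1 else 0) +
        (if i < n - 1 ∧ PySem.List.pyGetD arr (i + 1) 0 ≠ 0 then 1 else 0)
      if neighbors ≠ 1 then 0 else aLoop arr n is

def isRailroadTie3 (arr : List Int) : Int :=
  let n : Int := arr.length
  if n = 0 then 0
  else if arr.all (fun x => decide (x = 0)) then 0
  else aLoop arr n (PySem.List.pyRange 0 n 1)

-- ===== PORT B =====
-- the 'while True' loop of Source B; the in-range accesses are guarded by 'n - i < 2'.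
def bGo (arr : List Int) (n : Int) (i : Int) : Int :=
  if n - i < 2 ∨ PySem.List.pyGetD arr i 0 = 0 ∨ PySem.List.pyGetD arr (i + 1) 0 = 0 then 0
  else if i + 2 = n then 1
  else if PySem.List.pyGetD arr (i + 2) 0 ≠ 0 then 0
  else bGo arr n (i + 3)
termination_by (n - i).toNat
decreasing_by omega

def isRailroadTie3_alt (arr : List Int) : Int :=
  bGo arr (arr.length : Int) 0

-- ===== PRECONDITION & SPEC =====
def Spec_isRailroadTie3 (arr : List Int) (out : Int) : Prop := out = isRailroadTie3_alt arr
instance (arr : List Int) (out : Int) : Decidable (Spec_isRailroadTie3 arr out) := by unfold Spec_isRailroadTie3; infer_instance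

-- ===== CLAIM (what is proved, stated in full; the proofs are below) =====
def Claim_equal_isRailroadTie3 : Prop := ∀ (arr : List Int), Dom_isRailroadTie3 arr → Spec_isRailroadTie3 arr (isRailroadTie3 arr)

-- ===== LEMMAS AND PROOFS =====


-- pyGetD with default 0 returns 0 outside the list (used to turn "arr[i+1] != 0" into "i+1 < len")
lemma pyGetD_zero_of_ge (xs : List Int) (i : Int) (h : (xs.length : Int) ≤ i) :
    PySem.List.pyGetD xs i 0 = 0 := by
  apply PySem.List.pyGetD_of_none
  rw [PySem.List.pyGet?_eq_none_iff]
  unfold PySem.Raise.InRange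
  omega

-- Core loop correspondence: from an aligned position i (start, or just after a zero
-- separator), A's remaining index loop agrees with B's consumer.
lemma aLoop_eq_bGo (arr : List Int) (i : Int)
    (h0 : 0 ≤ i) (hin : i < (arr.length : Int))
    (hprev : i = 0 ∨ PySem.List.pyGetD arr (i - 1) 0 = 0) :
    aLoop arr (arr.length : Int) (PySem.List.pyRange i (arr.length : Int) 1) =
      bGo arr (arr.length : Int) i := by
  rw [PySem.List.pyRange_one_cons hin, aLoop, bGo]
  have hleft : ¬ (0 < i ∧ PySem.List.pyGetD arr (i - 1) 0 ≠ 0) := by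
    rcases hprev with h | h
    · omega
    · exact fun hc => hc.2 h
  by_cases hz : PySem.List.pyGetD arr i 0 = 0
  · -- A's zero branch; B returns 0 via its middle disjunct
    rw [if_pos hz, if_pos (Or.inr (Or.inl hz))]
    by_cases hb : i = 0 ∨ i = (arr.length : Int) - 1
    · rw [if_pos hb]
    · rw [if_neg hb]
      rcases hprev with h | h
      · exact absurd (Or.inl h) hb
      · rw [if_pos (Or.inl h)]
  · rw [if_neg hz]
    simp only []
    rw [if_neg hleft]
    by_cases hz1 : PySem.List.pyGetD arr (i + 1) 0 = 0
    · -- right neighbor zero (or missing): A counts 0 neighbors, B fails its first test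
      have e2 : (if i < (arr.length : Int) - 1 ∧ PySem.List.pyGetD arr (i + 1) 0 ≠ 0
          then (1 : Int) else 0) = 0 := if_neg (fun hc => hc.2 hz1)
      rw [e2, if_pos (show (0 : Int) + 0 ≠ 1 by decide), if_pos (Or.inr (Or.inr hz1))]
    · have hi1 : i + 1 < (arr.length : Int) := by
        by_contra hge
        exact hz1 (pyGetD_zero_of_ge arr (i + 1) (by omega))
      have e2 : (if i < (arr.length : Int) - 1 ∧ PySem.List.pyGetD arr (i + 1) 0 ≠ 0
          then (1 : Int) else 0) = 1 := if_pos ⟨by omega, hz1⟩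
      rw [e2, if_neg (show ¬ ((0 : Int) + 1 ≠ 1) by decide)]
      have hb1 : ¬ ((arr.length : Int) - i < 2 ∨ PySem.List.pyGetD arr i 0 = 0 ∨
          PySem.List.pyGetD arr (i + 1) 0 = 0) := by
        rintro (h | h | h)
        · omega
        · exact hz h
        · exact hz1 h
      rw [if_neg hb1]
      -- A's step at index i+1: left neighbor nonzero
      rw [PySem.List.pyRange_one_cons hi1, aLoop, if_neg hz1]
      simp only []
      have e3 : (if 0 < i + 1 ∧ PySem.List.pyGetD arr (i + 1 - 1) 0 ≠ 0
          then (1 : Int) else 0) = 1 :=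
        if_pos ⟨by omega, by rw [show i + 1 - 1 = i by omega]; exact hz⟩
      rw [e3]
      by_cases hend : i + 2 = (arr.length : Int)
      · -- exactly two nonzero entries remain: both return 1
        have e4 : (if i + 1 < (arr.length : Int) - 1 ∧
            PySem.List.pyGetD arr (i + 1 + 1) 0 ≠ 0 then (1 : Int) else 0) = 0 :=
          if_neg (fun hc => absurd hc.1 (by omega))
        rw [e4, if_neg (show ¬ ((1 : Int) + 0 ≠ 1) by decide), if_pos hend,
          PySem.List.pyRange_one_eq_nil (by omega), aLoop]
      · have hi2 : i + 2 < (arr.length : Int) := by omega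
        rw [if_neg hend]
        by_cases hz2 : PySem.List.pyGetD arr (i + 2) 0 = 0
        · -- a single zero separator follows the pair
          have e4 : (if i + 1 < (arr.length : Int) - 1 ∧
              PySem.List.pyGetD arr (i + 1 + 1) 0 ≠ 0 then (1 : Int) else 0) = 0 :=
            if_neg (fun hc => hc.2 (by rw [show i + 1 + 1 = i + 2 by omega]; exact hz2))
          rw [e4, if_neg (show ¬ ((1 : Int) + 0 ≠ 1) by decide),
            if_neg (show ¬ (PySem.List.pyGetD arr (i + 2) 0 ≠ 0) from not_not_intro hz2)]
          -- A's step at the separator index i+2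
          rw [show i + 1 + 1 = i + 2 by omega, PySem.List.pyRange_one_cons hi2, aLoop, if_pos hz2]
          by_cases hlast : i + 2 = (arr.length : Int) - 1
          · rw [if_pos (Or.inr hlast), bGo, if_pos (Or.inl (by omega))]
          · rw [if_neg (show ¬ (i + 2 = 0 ∨ i + 2 = (arr.length : Int) - 1) by
              rintro (h | h) <;> omega)]
            by_cases hz3 : PySem.List.pyGetD arr (i + 3) 0 = 0
            · rw [if_pos (show PySem.List.pyGetD arr (i + 2 - 1) 0 = 0 ∨
                  PySem.List.pyGetD arr (i + 2 + 1) 0 = 0 from Or.inr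
                  (by rw [show i + 2 + 1 = i + 3 by omega]; exact hz3)),
                bGo, if_pos (Or.inr (Or.inl hz3))]
            · rw [if_neg (show ¬ (PySem.List.pyGetD arr (i + 2 - 1) 0 = 0 ∨
                  PySem.List.pyGetD arr (i + 2 + 1) 0 = 0) by
                  rintro (h | h)
                  · exact hz1 (by rwa [show i + 2 - 1 = i + 1 by omega] at h)
                  · exact hz3 (by rwa [show i + 2 + 1 = i + 3 by omega] at h))]
              rw [show i + 2 + 1 = i + 3 by omega]
              exact aLoop_eq_bGo arr (i + 3) (by omega) (by omega)
                (Or.inr (by rw [show i + 3 - 1 = i + 2 by omega]; exact hz2))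
        · -- two nonzero runs touch: A counts 2 neighbors, B rejects the third element
          have e4 : (if i + 1 < (arr.length : Int) - 1 ∧
              PySem.List.pyGetD arr (i + 1 + 1) 0 ≠ 0 then (1 : Int) else 0) = 1 :=
            if_pos ⟨by omega, by rw [show i + 1 + 1 = i + 2 by omega]; exact hz2⟩
          rw [e4, if_pos (show (1 : Int) + 1 ≠ 1 by decide), if_pos hz2]
termination_by ((arr.length : Int) - i).toNat
decreasing_by omega

theorem isRailroadTie3_spec : Claim_equal_isRailroadTie3 := by
  intro arr _
  unfold Spec_isRailroadTie3 isRailroadTie3 isRailroadTie3_alt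
  simp only []
  match arr with
  | [] => rw [bGo]; simp
  | x :: xs =>
    rw [if_neg (by simp only [List.length_cons]; push_cast; omega : ¬ (((x :: xs).length : Int) = 0))]
    by_cases hall : (x :: xs).all (fun y => decide (y = 0))
    · -- all-zero input: arr[0] = 0 makes B's first test fire too
      have hx : x = 0 := by simpa using (List.all_eq_true.mp hall x (by simp))
      rw [if_pos hall, bGo,
        if_pos (Or.inr (Or.inl (by rw [PySem.List.pyGetD_zero_cons]; exact hx)))]
    · rw [if_neg hall]
      exact aLoop_eq_bGo (x :: xs) 0 le_rfl (by simp) (Or.inl rfl)
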